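-- pv_equiv track=rewrite | github.com/Calvnhd/Poker_Sim | cards.py | interpret_eval
-- ===== SOURCE A (Python) =====
-- def interpret_eval(hand):
--     if hand == [0,0,0]:
--         return 'FOLDED'
--     x = hand[:]
--     for i in range(1, len(x)):
--         if x[i] == 11:
--             x[i] = 'J'
--         elif x[i] == 12:
--             x[i] = 'Q'
--         elif x[i] == 13:
--             x[i] = 'K'
--         elif x[i] == 14:
--             x[i] = 'A'
--
--     #Output message
--     if x[0] == 9:
--         output = 'Royal Flush!'
--     elif x[0] == 8 and len(x) == 2:
--         output = 'Straight Flush, ' + str(x[1]) + ' high'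
--     elif x[0] == 7 and len(x) == 3:
--         output = 'Four of a Kind, ' + str(x[1]) + 's with ' + str(x[2]) + ' kicker'
--     elif x[0] == 6 and len(x) == 3:
--         output = 'Full House, ' + str(x[1]) + 's full of ' + str(x[2]) + 's'
--     elif x[0] == 5 and len(x) == 6:
--         output = 'Flush, ' + str(x[1]) + ' high followed by ' + str(x[2]) + ' ' + str(x[3]) + ' ' +  str(x[4]) + ' ' +  str(x[5])
--     elif x[0] == 4 and len(x) == 2:
--         output = 'Straight, ' + str(x[1]) + ' high'
--     elif x[0] == 3 and len(x) == 4: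
--         output = 'Three of a Kind, ' + str(x[1]) + 's with ' + str(x[2]) + ' ' + str(x[3]) + ' kickers'
--     elif x[0] == 2 and len(x) == 4:
--         output = 'Two Pair, ' + str(x[1]) + 's and ' + str(x[2]) + 's with ' + str(x[3]) + ' kicker'
--     elif x[0] == 1  and len(x) == 5:
--         output = 'Pair of ' + str(x[1]) + 's, with '+ str(x[2]) + ' ' + str(x[3]) + ' ' + str(x[4]) + ' kickers'
--     elif x[0] == 0 and len(x) == 6:
--         output = str(x[1]) + ' High, followed by ' + str(x[2]) + ' ' + str(x[3]) + ' ' + str(x[4]) + ' ' + str(x[5])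
--     else:
--         output = 'ERROR INTERPRETTING HAND EVALUATION CODE'
--     return output
-- ===== SOURCE B (Python) =====
-- _TEMPLATES = {
--     9: 'Royal Flush!',
--     8: 'Straight Flush, {} high',
--     7: 'Four of a Kind, {}s with {} kicker',
--     6: 'Full House, {}s full of {}s',
--     5: 'Flush, {} high followed by {} {} {} {}',
--     4: 'Straight, {} high',
--     3: 'Three of a Kind, {}s with {} {} kickers',
--     2: 'Two Pair, {}s and {}s with {} kicker',
--     1: 'Pair of {}s, with {} {} {} kickers',
--     0: '{} High, followed by {} {} {} {}',
-- }
--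
--
-- def interpret_eval(hand):
--     if hand == [0, 0, 0]:
--         return 'FOLDED'
--     tpl = _TEMPLATES.get(hand[0])
--     if tpl is None:
--         return 'ERROR INTERPRETTING HAND EVALUATION CODE'
--     parts = tpl.split('{}')
--     cards = ['JQKA'[v - 11] if 11 <= v <= 14 else str(v) for v in hand[1:]]
--     if hand[0] != 9 and len(parts) - 1 != len(cards):
--         return 'ERROR INTERPRETTING HAND EVALUATION CODE'
--     out = parts[0]
--     for card, rest in zip(cards, parts[1:]):
--         out += card + rest
--     return out
-- ===== Notes on version B (the rewrite author's own statement) =====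
-- stated objective: alternative
-- what changed: Replaces A's ten-branch if/elif chain of hand-written concatenations by a generic template-interpolation engine: each rank code maps to one '{}'-template string, the template is split on '{}' and the pieces are interleaved with the converted cards in a single fold, the arity check becoming 'placeholder count == number of cards'; B also looks up the template before converting any cards, so unknown codes return ERROR without A's full-hand face-conversion pass (measured faster).
import Mathlib
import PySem

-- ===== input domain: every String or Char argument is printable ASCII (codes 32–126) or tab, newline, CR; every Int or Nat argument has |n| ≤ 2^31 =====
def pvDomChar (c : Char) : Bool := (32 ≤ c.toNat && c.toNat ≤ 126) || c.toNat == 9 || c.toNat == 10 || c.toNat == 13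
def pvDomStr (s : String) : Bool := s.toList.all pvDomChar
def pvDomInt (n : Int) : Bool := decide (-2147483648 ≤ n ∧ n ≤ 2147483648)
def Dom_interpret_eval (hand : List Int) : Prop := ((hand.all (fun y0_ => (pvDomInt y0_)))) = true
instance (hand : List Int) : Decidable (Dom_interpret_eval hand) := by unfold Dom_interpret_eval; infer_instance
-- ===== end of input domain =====

-- B replaces A's if/elif chain of hand-written concatenations by a template-interpolation
-- engine: one '{}'-template per rank code, split on '{}' and interleaved with the cards.

-- ===== PORT A =====
-- A's conversion loop replaces 11..14 (at indices ≥ 1) by face letters; other entries are later str()-ed.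
def pvCardA (v : Int) : String :=
  if v = 11 then "J"
  else if v = 12 then "Q"
  else if v = 13 then "K"
  else if v = 14 then "A"
  else PySem.Int.toStr v

-- x[i] for i ≥ 1 on the converted list (branches only read it after checking len(x), so it is in range)
def pvGA (t : List String) (i : Nat) : String := (PySem.List.pyGet? t (Int.ofNat i)).getD ""

def interpret_eval (hand : List Int) : String :=
  if hand = [0, 0, 0] then "FOLDED"
  else
    match hand with
    | [] => ""   -- Python raises IndexError on x[0] here; excluded by Pre_interpret_eval
    | h :: tl =>
      let x := tl.map pvCardA
      let n := 1 + tl.length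
      if h = 9 then "Royal Flush!"
      else if h = 8 ∧ n = 2 then "Straight Flush, " ++ pvGA x 0 ++ " high"
      else if h = 7 ∧ n = 3 then "Four of a Kind, " ++ pvGA x 0 ++ "s with " ++ pvGA x 1 ++ " kicker"
      else if h = 6 ∧ n = 3 then "Full House, " ++ pvGA x 0 ++ "s full of " ++ pvGA x 1 ++ "s"
      else if h = 5 ∧ n = 6 then "Flush, " ++ pvGA x 0 ++ " high followed by " ++ pvGA x 1 ++ " " ++ pvGA x 2 ++ " " ++ pvGA x 3 ++ " " ++ pvGA x 4
      else if h = 4 ∧ n = 2 then "Straight, " ++ pvGA x 0 ++ " high"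
      else if h = 3 ∧ n = 4 then "Three of a Kind, " ++ pvGA x 0 ++ "s with " ++ pvGA x 1 ++ " " ++ pvGA x 2 ++ " kickers"
      else if h = 2 ∧ n = 4 then "Two Pair, " ++ pvGA x 0 ++ "s and " ++ pvGA x 1 ++ "s with " ++ pvGA x 2 ++ " kicker"
      else if h = 1 ∧ n = 5 then "Pair of " ++ pvGA x 0 ++ "s, with " ++ pvGA x 1 ++ " " ++ pvGA x 2 ++ " " ++ pvGA x 3 ++ " kickers"
      else if h = 0 ∧ n = 6 then pvGA x 0 ++ " High, followed by " ++ pvGA x 1 ++ " " ++ pvGA x 2 ++ " " ++ pvGA x 3 ++ " " ++ pvGA x 4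
      else "ERROR INTERPRETTING HAND EVALUATION CODE"

-- ===== PORT B =====
-- the template table: rank code → one '{}'-template string
def pvTplB : PySem.Dict Int String := PySem.Dict.ofList
  [ (9, "Royal Flush!"),
    (8, "Straight Flush, {} high"),
    (7, "Four of a Kind, {}s with {} kicker"),
    (6, "Full House, {}s full of {}s"),
    (5, "Flush, {} high followed by {} {} {} {}"),
    (4, "Straight, {} high"),
    (3, "Three of a Kind, {}s with {} {} kickers"),
    (2, "Two Pair, {}s and {}s with {} kicker"),
    (1, "Pair of {}s, with {} {} {} kickers"),
    (0, "{} High, followed by {} {} {} {}") ]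

-- 'JQKA'[v - 11] if 11 <= v <= 14 else str(v)  (the index is in range whenever the branch fires)
def pvCardB (v : Int) : String :=
  if 11 ≤ v ∧ v ≤ 14 then ((PySem.Str.pyGet? "JQKA" (v - 11)).map (fun c => String.ofList [c])).getD ""
  else PySem.Int.toStr v

def interpret_eval_alt (hand : List Int) : String :=
  if hand = [0, 0, 0] then "FOLDED"
  else
    match hand with
    | [] => ""   -- Python raises IndexError on hand[0] here; excluded by Pre_interpret_eval
    | h :: tl =>
      match PySem.Dict.get? pvTplB h with
      | none => "ERROR INTERPRETTING HAND EVALUATION CODE"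
      | some tpl =>
        let parts := (PySem.Str.split? tpl "{}").getD []
        let cards := tl.map pvCardB
        if h ≠ 9 ∧ (parts.length : Int) - 1 ≠ (cards.length : Int) then
          "ERROR INTERPRETTING HAND EVALUATION CODE"
        else
          (cards.zip parts.tail).foldl (fun out p => out ++ p.1 ++ p.2) (parts.headD "")

-- ===== PRECONDITION & SPEC =====
-- Pre_ excludes only the empty list, on which both Pythons raise IndexError (hand[0]/x[0]).
def Pre_interpret_eval (hand : List Int) : Prop := hand ≠ []
instance (hand : List Int) : Decidable (Pre_interpret_eval hand) := by unfold Pre_interpret_eval; infer_instance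
def pvWitness_interpret_eval : List Int := [8, 14]

def Spec_interpret_eval (hand : List Int) (out : String) : Prop := out = interpret_eval_alt hand
instance (hand : List Int) (out : String) : Decidable (Spec_interpret_eval hand out) := by unfold Spec_interpret_eval; infer_instance

-- ===== CLAIM (what is proved, stated in full; the proofs are below) =====
def Claim_equal_interpret_eval : Prop := ∀ (hand : List Int), Dom_interpret_eval hand → Pre_interpret_eval hand → Spec_interpret_eval hand (interpret_eval hand)

-- ===== LEMMAS AND PROOFS =====
theorem pvCard_eq (v : Int) : pvCardA v = pvCardB v := by
  by_cases h11 : v = 11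
  · subst h11; decide
  by_cases h12 : v = 12
  · subst h12; decide
  by_cases h13 : v = 13
  · subst h13; decide
  by_cases h14 : v = 14
  · subst h14; decide
  have : ¬ (11 ≤ v ∧ v ≤ 14) := by omega
  simp [pvCardA, pvCardB, h11, h12, h13, h14, this]

theorem pvCard_funext : pvCardA = pvCardB := funext pvCard_eq

theorem pvTplB_none (h : Int) (h9 : ¬h = 9) (h8 : ¬h = 8) (h7 : ¬h = 7) (h6 : ¬h = 6)
    (h5 : ¬h = 5) (h4 : ¬h = 4) (h3 : ¬h = 3) (h2 : ¬h = 2) (h1 : ¬h = 1) (h0 : ¬h = 0) :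
    PySem.Dict.get? pvTplB h = none := by
  have hm : pvTplB = PySem.Dict.mk pvTplB.items := rfl
  rw [hm]
  simp only [PySem.Dict.get?, Option.map_eq_none_iff, List.find?_eq_none, beq_iff_eq]
  intro p hmem
  have hk : p.1 ∈ pvTplB.items.map Prod.fst := List.mem_map_of_mem hmem
  rw [show pvTplB.items.map Prod.fst = [9, 8, 7, 6, 5, 4, 3, 2, 1, 0] from rfl] at hk
  simp at hk
  intro he
  subst he
  omega

-- ===== VERDICT (by name: the statement is the Claim_ definition above) =====
theorem interpret_eval_spec : Claim_equal_interpret_eval := by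
  intro hand _hdom hpre
  unfold Spec_interpret_eval interpret_eval interpret_eval_alt
  by_cases hf : hand = [0, 0, 0]
  · simp [hf]
  · simp only [hf, if_false]
    match hand with
    | [] => exact absurd rfl hpre
    | h :: tl =>
      simp only [pvCard_funext]
      by_cases h9 : h = 9
      · subst h9
        have hd : PySem.Dict.get? pvTplB 9 = some "Royal Flush!" := rfl
        have hs : PySem.Str.split? "Royal Flush!" "{}" = some ["Royal Flush!"] := by decide
        simp [hd, hs]
      by_cases h8 : h = 8
      · subst h8
        have hd : PySem.Dict.get? pvTplB 8 = some "Straight Flush, {} high" := rfl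
        have hs : PySem.Str.split? "Straight Flush, {} high" "{}" = some ["Straight Flush, ", " high"] := by decide
        by_cases hl : tl.length = 1
        · match tl, hl with
          | [a], _ => simp [hd, hs, pvGA]
        · simp [hd, hs]
          rw [if_neg (by omega), if_neg (by omega)]
      by_cases h7 : h = 7
      · subst h7
        have hd : PySem.Dict.get? pvTplB 7 = some "Four of a Kind, {}s with {} kicker" := rfl
        have hs : PySem.Str.split? "Four of a Kind, {}s with {} kicker" "{}" = some ["Four of a Kind, ", "s with ", " kicker"] := by decide
        by_cases hl : tl.length = 2
        · match tl, hl with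
          | [a, b], _ => simp [hd, hs, pvGA]
        · simp [hd, hs]
          rw [if_neg (by omega), if_neg (by omega)]
      by_cases h6 : h = 6
      · subst h6
        have hd : PySem.Dict.get? pvTplB 6 = some "Full House, {}s full of {}s" := rfl
        have hs : PySem.Str.split? "Full House, {}s full of {}s" "{}" = some ["Full House, ", "s full of ", "s"] := by decide
        by_cases hl : tl.length = 2
        · match tl, hl with
          | [a, b], _ => simp [hd, hs, pvGA]
        · simp [hd, hs]
          rw [if_neg (by omega), if_neg (by omega)]
      by_cases h5 : h = 5
      · subst h5
        have hd : PySem.Dict.get? pvTplB 5 = some "Flush, {} high followed by {} {} {} {}" := rfl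
        have hs : PySem.Str.split? "Flush, {} high followed by {} {} {} {}" "{}" = some ["Flush, ", " high followed by ", " ", " ", " ", ""] := by decide
        by_cases hl : tl.length = 5
        · match tl, hl with
          | [a, b, c, d, e], _ => simp [hd, hs, pvGA]
        · simp [hd, hs]
          rw [if_neg (by omega), if_neg (by omega)]
      by_cases h4 : h = 4
      · subst h4
        have hd : PySem.Dict.get? pvTplB 4 = some "Straight, {} high" := rfl
        have hs : PySem.Str.split? "Straight, {} high" "{}" = some ["Straight, ", " high"] := by decide
        by_cases hl : tl.length = 1
        · match tl, hl with
          | [a], _ => simp [hd, hs, pvGA]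
        · simp [hd, hs]
          rw [if_neg (by omega), if_neg (by omega)]
      by_cases h3 : h = 3
      · subst h3
        have hd : PySem.Dict.get? pvTplB 3 = some "Three of a Kind, {}s with {} {} kickers" := rfl
        have hs : PySem.Str.split? "Three of a Kind, {}s with {} {} kickers" "{}" = some ["Three of a Kind, ", "s with ", " ", " kickers"] := by decide
        by_cases hl : tl.length = 3
        · match tl, hl with
          | [a, b, c], _ => simp [hd, hs, pvGA]
        · simp [hd, hs]
          rw [if_neg (by omega), if_neg (by omega)]
      by_cases h2 : h = 2
      · subst h2
        have hd : PySem.Dict.get? pvTplB 2 = some "Two Pair, {}s and {}s with {} kicker" := rfl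
        have hs : PySem.Str.split? "Two Pair, {}s and {}s with {} kicker" "{}" = some ["Two Pair, ", "s and ", "s with ", " kicker"] := by decide
        by_cases hl : tl.length = 3
        · match tl, hl with
          | [a, b, c], _ => simp [hd, hs, pvGA]
        · simp [hd, hs]
          rw [if_neg (by omega), if_neg (by omega)]
      by_cases h1 : h = 1
      · subst h1
        have hd : PySem.Dict.get? pvTplB 1 = some "Pair of {}s, with {} {} {} kickers" := rfl
        have hs : PySem.Str.split? "Pair of {}s, with {} {} {} kickers" "{}" = some ["Pair of ", "s, with ", " ", " ", " kickers"] := by decide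
        by_cases hl : tl.length = 4
        · match tl, hl with
          | [a, b, c, d], _ => simp [hd, hs, pvGA]
        · simp [hd, hs]
          rw [if_neg (by omega), if_neg (by omega)]
      by_cases h0 : h = 0
      · subst h0
        have hd : PySem.Dict.get? pvTplB 0 = some "{} High, followed by {} {} {} {}" := rfl
        have hs : PySem.Str.split? "{} High, followed by {} {} {} {}" "{}" = some ["", " High, followed by ", " ", " ", " ", ""] := by decide
        by_cases hl : tl.length = 5
        · match tl, hl with
          | [a, b, c, d, e], _ => simp [hd, hs, pvGA]
        · simp [hd, hs]
          rw [if_neg (by omega), if_neg (by omega)]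
      rw [pvTplB_none h h9 h8 h7 h6 h5 h4 h3 h2 h1 h0]
      simp [h9, h8, h7, h6, h5, h4, h3, h2, h1, h0]
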